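-- pv_equiv track=rewrite | github.com/xiaoxiandezhuque/python | main/xiaoshuo/查找更新的小说.py | cleanNewUrl
-- ===== SOURCE A (Python) =====
-- def cleanNewUrl(urls, saveUrl):
--     urls = urls[::-1]
--     newUrls = []
--     for url in urls:
--         if url == saveUrl:
--             return newUrls
--         else:
--             newUrls.insert(0, url)
-- ===== SOURCE B (Python) =====
-- def cleanNewUrl(urls, saveUrl):
--     i = len(urls) - 1
--     while i >= 0:
--         if urls[i] == saveUrl:
--             return urls[i+1:]
--         i -= 1
--     return None
-- ===== Notes on version B (the rewrite author's own statement) =====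
-- stated objective: faster
-- what changed: B scans backwards for the last occurrence of saveUrl once and returns the slice after it, instead of A's reversed loop that builds the result with repeated insert(0, url) (quadratic).
import Mathlib
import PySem

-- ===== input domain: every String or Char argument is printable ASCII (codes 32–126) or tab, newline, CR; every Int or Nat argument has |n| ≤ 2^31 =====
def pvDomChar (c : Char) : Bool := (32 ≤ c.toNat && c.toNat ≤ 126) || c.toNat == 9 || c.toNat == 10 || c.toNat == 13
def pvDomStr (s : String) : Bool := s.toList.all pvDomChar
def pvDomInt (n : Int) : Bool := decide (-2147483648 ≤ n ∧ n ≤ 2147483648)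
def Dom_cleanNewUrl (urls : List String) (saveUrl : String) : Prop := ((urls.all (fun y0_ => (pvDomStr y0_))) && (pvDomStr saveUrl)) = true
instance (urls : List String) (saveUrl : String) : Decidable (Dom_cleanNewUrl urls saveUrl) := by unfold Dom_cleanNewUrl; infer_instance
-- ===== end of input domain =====

-- B finds the last occurrence of saveUrl in one backward scan and returns the slice
-- after it, replacing A's reversed loop with repeated insert(0, url); return value only.

-- ===== PORT A =====
-- the for-loop over the reversed list: acc is newUrls; insert(0, url) = url :: acc
def cleanNewUrlGoA (saveUrl : String) : List String → List String → Option (List String)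
  | [], _ => none
  | u :: rest, acc => if u = saveUrl then some acc else cleanNewUrlGoA saveUrl rest (u :: acc)

def cleanNewUrl (urls : List String) (saveUrl : String) : Option (List String) :=
  cleanNewUrlGoA saveUrl urls.reverse []   -- urls[::-1]

-- ===== PORT B =====
-- the while-loop: fuel k means current index i = k - 1; urls[i] is in range, urls[i+1:] = drop (i+1)
def cleanNewUrlGoB (urls : List String) (saveUrl : String) : Nat → Option (List String)
  | 0 => none
  | k + 1 => if urls.getD k "" = saveUrl then some (urls.drop (k + 1))
             else cleanNewUrlGoB urls saveUrl k

def cleanNewUrl_alt (urls : List String) (saveUrl : String) : Option (List String) :=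
  cleanNewUrlGoB urls saveUrl urls.length

-- ===== PRECONDITION & SPEC =====
def Spec_cleanNewUrl (urls : List String) (saveUrl : String) (out : Option (List String)) : Prop := out = cleanNewUrl_alt urls saveUrl
instance (urls : List String) (saveUrl : String) (out : Option (List String)) : Decidable (Spec_cleanNewUrl urls saveUrl out) := by unfold Spec_cleanNewUrl; infer_instance

-- ===== CLAIM (what is proved, stated in full; the proofs are below) =====
def Claim_equal_cleanNewUrl : Prop := ∀ (urls : List String) (saveUrl : String), Dom_cleanNewUrl urls saveUrl → Spec_cleanNewUrl urls saveUrl (cleanNewUrl urls saveUrl)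

-- ===== LEMMAS AND PROOFS =====

theorem goA_acc (saveUrl : String) (r acc : List String) :
    cleanNewUrlGoA saveUrl r acc = (cleanNewUrlGoA saveUrl r []).map (· ++ acc) := by
  induction r generalizing acc with
  | nil => simp [cleanNewUrlGoA]
  | cons u rest ih =>
    by_cases h : u = saveUrl
    · simp [cleanNewUrlGoA, h]
    · simp only [cleanNewUrlGoA, if_neg h]
      rw [ih (u :: acc), ih [u]]
      cases cleanNewUrlGoA saveUrl rest [] <;> simp

theorem goB_snoc (urls : List String) (a saveUrl : String) (k : Nat) (hk : k ≤ urls.length) :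
    cleanNewUrlGoB (urls ++ [a]) saveUrl k = (cleanNewUrlGoB urls saveUrl k).map (· ++ [a]) := by
  induction k with
  | zero => simp [cleanNewUrlGoB]
  | succ k ih =>
    have hk' : k < urls.length := hk
    have hget : (urls ++ [a]).getD k "" = urls.getD k "" := by
      simp [List.getD_eq_getElem?_getD, List.getElem?_append_left hk']
    have hdrop : (urls ++ [a]).drop (k + 1) = urls.drop (k + 1) ++ [a] := by
      rw [List.drop_append_of_le_length (by omega)]
    simp only [cleanNewUrlGoB, hget, hdrop]
    split_ifs with h
    · simp
    · exact ih (Nat.le_of_lt hk')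

theorem key (urls : List String) (saveUrl : String) :
    cleanNewUrlGoA saveUrl urls.reverse [] = cleanNewUrlGoB urls saveUrl urls.length := by
  induction urls using List.reverseRecOn with
  | nil => simp [cleanNewUrlGoA, cleanNewUrlGoB]
  | append_singleton l a ih =>
    rw [List.reverse_append]
    simp only [List.reverse_cons, List.reverse_nil, List.nil_append, List.cons_append,
      List.length_append, List.length_cons, List.length_nil]
    show cleanNewUrlGoA saveUrl (a :: l.reverse) [] = cleanNewUrlGoB (l ++ [a]) saveUrl (l.length + 1)
    have hget : (l ++ [a]).getD l.length "" = a := by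
      simp [List.getD_eq_getElem?_getD]
    have hdrop : (l ++ [a]).drop (l.length + 1) = [] := by
      simp
    simp only [cleanNewUrlGoA, cleanNewUrlGoB, hget, hdrop]
    by_cases h : a = saveUrl
    · simp [h]
    · have h' : ¬ (a = saveUrl) := h
      rw [if_neg h', if_neg h']
      rw [goA_acc, ih, goB_snoc _ _ _ _ (le_refl _)]

-- ===== VERDICT (by name: the statement is the Claim_ definition above) =====
theorem cleanNewUrl_spec : Claim_equal_cleanNewUrl := by
  intro urls saveUrl _
  show cleanNewUrl urls saveUrl = cleanNewUrl_alt urls saveUrl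
  exact key urls saveUrl
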